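-- pv_equiv track=rewrite | github.com/dlwlwns52/Algorithm | 프로그래머스/2/131127. 할인 행사/할인 행사.py | solution
-- ===== SOURCE A (Python) =====
-- from collections import Counter
--
-- def solution(want, number, discount):
--     answer = 0
--     number_sum = 0
-- #1
--     for i in number:
--         number_sum += i
-- #2
--     discount_len = len(discount)
-- # 3
--     total = discount_len - number_sum + 1
-- # 4, 5
--     want_dic = {}
--     for i in range(len(number)):
--         want_dic[want[i]] = number[i]
-- # 6, 7
--     for i in range(total):
--         imsi = []
--         for k in range(i, number_sum+i):
--             imsi.append(discount[k])
--         else: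
--             if Counter(imsi) == want_dic:
--                 answer += 1
--     return answer
-- ===== SOURCE B (Python) =====
-- from collections import Counter
--
-- def solution(want, number, discount):
--     m = sum(number)
--     target = dict(zip(want, number))
--     cnt = Counter(discount[:m])
--     answer = 0
--     for i in range(len(discount) - m + 1):
--         if i:
--             cnt[discount[i + m - 1]] += 1
--             cnt[discount[i - 1]] -= 1
--             if not cnt[discount[i - 1]]:
--                 del cnt[discount[i - 1]]
--         if cnt == target:
--             answer += 1
--     return answer
-- ===== Notes on version B (the rewrite author's own statement) =====
-- stated objective: alternative
-- what changed: A rebuilds every window as a fresh list and a fresh Counter per window position; B keeps one Counter over a sliding window, updated by one increment and one decrement per window shift. Pre_ excludes inputs where A raises IndexError (len(number) > len(want)) and inputs with a negative total wanted count sum(number) < 0, on which A's 0 is an accident of iterating empty inner ranges while B's sliding indices run out of range (B raises IndexError).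
-- outside the precondition, e.g. on solution(['a', 'a'], [-3, 2], ['a', 'a', 'a']): A returns 0, B raises IndexError
import Mathlib
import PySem

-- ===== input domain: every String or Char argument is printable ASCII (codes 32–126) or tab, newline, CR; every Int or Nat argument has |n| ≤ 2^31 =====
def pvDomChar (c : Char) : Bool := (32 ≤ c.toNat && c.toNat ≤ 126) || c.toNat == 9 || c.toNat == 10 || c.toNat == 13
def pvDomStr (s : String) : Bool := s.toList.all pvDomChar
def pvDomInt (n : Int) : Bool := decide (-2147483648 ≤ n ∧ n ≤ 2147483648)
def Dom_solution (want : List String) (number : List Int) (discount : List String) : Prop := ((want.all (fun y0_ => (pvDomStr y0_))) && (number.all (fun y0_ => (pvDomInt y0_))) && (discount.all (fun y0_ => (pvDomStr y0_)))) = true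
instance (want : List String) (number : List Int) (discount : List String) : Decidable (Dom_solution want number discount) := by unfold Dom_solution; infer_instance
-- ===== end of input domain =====

-- B replaces A's per-window list building and fresh Counter per window by one sliding-window
-- Counter updated by a single increment and decrement per shift (objective: alternative).

-- Python's `==` between dict-like values (Counter / dict): equality as key→value maps,
-- insertion order ignored.  Used by both ports (both Pythons compare with `==`).
def pvDictEq (d1 d2 : PySem.Dict String Int) : Bool :=
  d1.items.all (fun p => d2.get? p.1 == some p.2) &&
  d2.items.all (fun p => d1.get? p.1 == some p.2)

-- ===== PORT A =====
def solution (want : List String) (number : List Int) (discount : List String) : Int :=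
  let number_sum : Int := number.foldl (fun s i => s + i) 0
  let discount_len : Int := (discount.length : Int)
  let total : Int := discount_len - number_sum + 1
  let want_dic : PySem.Dict String Int :=
    (PySem.List.pyRange 0 (number.length : Int)).foldl
      (fun d i => d.insert (PySem.List.pyGetD want i "") (PySem.List.pyGetD number i 0))
      PySem.Dict.empty
  (PySem.List.pyRange 0 total).foldl
    (fun answer i =>
      let imsi : List String :=
        (PySem.List.pyRange i (number_sum + i)).foldl
          (fun l k => l ++ [PySem.List.pyGetD discount k ""]) []
      if pvDictEq (PySem.Dict.counter imsi) want_dic then answer + 1 else answer)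
    0

-- ===== PORT B =====
def solution_alt (want : List String) (number : List Int) (discount : List String) : Int :=
  let m : Int := number.foldl (fun s i => s + i) 0
  let target : PySem.Dict String Int := PySem.Dict.ofList (want.zip number)
  let cnt0 : PySem.Dict String Int := PySem.Dict.counter (PySem.List.slice discount none (some m))
  ((PySem.List.pyRange 0 ((discount.length : Int) - m + 1)).foldl
    (fun (st : PySem.Dict String Int × Int) i =>
      let cnt :=
        if 0 < i then
          let add := PySem.List.pyGetD discount (i + m - 1) ""
          let cnt1 := st.1.insert add (st.1.getD add 0 + 1)
          let rem := PySem.List.pyGetD discount (i - 1) ""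
          let c := cnt1.getD rem 0 - 1
          let cnt2 := cnt1.insert rem c
          if c == 0 then cnt2.erase rem else cnt2
        else st.1
      (cnt, st.2 + (if pvDictEq cnt target then 1 else 0)))
    (cnt0, 0)).2

-- ===== PRECONDITION & SPEC =====
-- Pre_ excludes (a) inputs where A raises IndexError (len(number) > len(want), hit while
-- building want_dic), and (b) inputs whose total wanted count sum(number) is negative, where
-- A's 0 is an accident of iterating empty inner ranges and B's sliding indices go out of
-- range (B raises IndexError there).
def Pre_solution (want : List String) (number : List Int) (discount : List String) : Prop :=
  number.length ≤ want.length ∧ 0 ≤ number.foldl (fun s i => s + i) 0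
instance (want : List String) (number : List Int) (discount : List String) : Decidable (Pre_solution want number discount) := by unfold Pre_solution; infer_instance

def pvWitness_solution : List String × List Int × List String :=
  (["a", "b"], [1, 2], ["a", "b", "b", "a", "b", "b"])

def Spec_solution (want : List String) (number : List Int) (discount : List String) (out : Int) : Prop := out = solution_alt want number discount
instance (want : List String) (number : List Int) (discount : List String) (out : Int) : Decidable (Spec_solution want number discount out) := by unfold Spec_solution; infer_instance

-- ===== CLAIM (what is proved, stated in full; the proofs are below) =====
def Claim_equal_solution : Prop := ∀ (want : List String) (number : List Int) (discount : List String), Dom_solution want number discount → Pre_solution want number discount → Spec_solution want number discount (solution want number discount)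

-- ===== LEMMAS AND PROOFS =====

-- `if 0 < n then some n else none`: the key→value map of a counter dict at one key.
def pvPC (n : Nat) : Option Int := if 0 < n then some (n : Int) else none

-- the window of length mm starting at position a
def pvW (discount : List String) (mm a : Nat) : List String := (discount.drop a).take mm

-- B's loop body with the indices written as Nat (the form the invariant recurses over)
def pvBStep (discount : List String) (target : PySem.Dict String Int) (mm : Nat)
    (st : PySem.Dict String Int × Int) (i : Nat) : PySem.Dict String Int × Int :=
  let cnt :=
    if 0 < i then
      let add := discount.getD (mm + (i - 1)) ""
      let cnt1 := st.1.insert add (st.1.getD add 0 + 1)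
      let rem := discount.getD (i - 1) ""
      let c := cnt1.getD rem 0 - 1
      let cnt2 := cnt1.insert rem c
      if c == 0 then cnt2.erase rem else cnt2
    else st.1
  (cnt, st.2 + (if pvDictEq cnt target then 1 else 0))

theorem dictEq_iff (d1 d2 : PySem.Dict String Int) (h1 : d1.keys.Nodup) (h2 : d2.keys.Nodup) :
    pvDictEq d1 d2 = true ↔ ∀ k, d1.get? k = d2.get? k := by
  unfold pvDictEq
  simp only [Bool.and_eq_true, List.all_eq_true, beq_iff_eq]
  constructor
  · rintro ⟨ha, hb⟩ k
    cases hv : d1.get? k with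
    | some v =>
      have hm : (k, v) ∈ d1.items := (PySem.Dict.get?_eq_some_iff_mem_items d1 k v h1).mp hv
      exact (ha _ hm).symm ▸ rfl
    | none =>
      cases hw : d2.get? k with
      | some w =>
        have hm : (k, w) ∈ d2.items := (PySem.Dict.get?_eq_some_iff_mem_items d2 k w h2).mp hw
        have := hb _ hm
        simp [hv] at this
      | none => rfl
  · intro h
    constructor
    · intro p hp
      have := PySem.Dict.get?_of_mem_items d1 hp h1
      rw [← h p.1, this]
    · intro p hp
      have := PySem.Dict.get?_of_mem_items d2 hp h2
      rw [h p.1, this]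

theorem dictEq_congr (d d' t : PySem.Dict String Int) (hd : d.keys.Nodup) (hd' : d'.keys.Nodup)
    (ht : t.keys.Nodup) (h : ∀ k, d.get? k = d'.get? k) :
    pvDictEq d t = pvDictEq d' t := by
  cases hv : pvDictEq d' t with
  | true => exact (dictEq_iff d t hd ht).mpr (fun k => (h k).trans (((dictEq_iff d' t hd' ht).mp hv) k))
  | false =>
    by_contra hc
    have : pvDictEq d t = true := by revert hc; cases pvDictEq d t <;> simp
    have := (dictEq_iff d t hd ht).mp this
    have : pvDictEq d' t = true := (dictEq_iff d' t hd' ht).mpr (fun k => ((h k).symm.trans (this k)))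
    simp [hv] at this

theorem counter_get?_eq (xs : List String) (s : String) :
    (PySem.Dict.counter xs).get? s = pvPC (xs.count s) := by
  by_cases hmem : s ∈ xs
  · have hc : 0 < xs.count s := List.count_pos_iff.mpr hmem
    have hk : s ∈ (PySem.Dict.counter xs).keys := by
      rw [PySem.Dict.keys_counter]; exact (PySem.Set.mem_ofList xs s).mpr hmem
    cases hv : (PySem.Dict.counter xs).get? s with
    | none => exact absurd ((PySem.Dict.get?_eq_none_iff_not_mem_keys _ s).mp hv) (by simpa [PySem.Dict.keys_counter, PySem.Set.mem_ofList] using hk)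
    | some v =>
      have := PySem.Dict.getD_of_get?_eq_some (PySem.Dict.counter xs) 0 hv
      rw [PySem.Dict.getD_counter] at this
      simp [pvPC, hc, ← this]
  · have : xs.count s = 0 := List.count_eq_zero.mpr hmem
    rw [this]
    have : (PySem.Dict.counter xs).get? s = none := by
      rw [PySem.Dict.get?_eq_none_iff_not_mem_keys, PySem.Dict.keys_counter]
      simp [PySem.Set.mem_ofList, hmem]
    simp [this, pvPC]

theorem get?_erase' (d : PySem.Dict String Int) (k k' : String) :
    (d.erase k).get? k' = if k' = k then none else d.get? k' := by
  simp only [PySem.Dict.erase, PySem.Dict.get?, List.find?_filter]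
  split
  · rename_i he; subst he
    induction d.items with
    | nil => rfl
    | cons p l ih => by_cases hp : p.1 = k' <;> simp [List.find?, hp]
  · rename_i hne
    have hfun : (fun a : String × Int => decide ((!a.1 == k) = true ∧ (a.1 == k') = true))
        = (fun a : String × Int => a.1 == k') := by
      funext a
      by_cases ha : a.1 = k' <;> simp [ha, hne]
    rw [hfun]

theorem nodup_keys_erase (d : PySem.Dict String Int) (k : String) (h : d.keys.Nodup) :
    (d.erase k).keys.Nodup := by
  have hsub : (d.erase k).items.Sublist d.items := by
    simp only [PySem.Dict.erase]
    exact List.filter_sublist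
  exact ((hsub.map Prod.fst).nodup h)

theorem foldl_insert_range_zip (number : List Int) :
    ∀ (want : List String) (d : PySem.Dict String Int), number.length ≤ want.length →
    (List.range number.length).foldl
        (fun d i => d.insert (want.getD i "") (number.getD i 0)) d
      = (want.zip number).foldl (fun d p => d.insert p.1 p.2) d := by
  induction number with
  | nil => intro want d _; simp
  | cons x num ih =>
    intro want d h
    cases want with
    | nil => simp at h
    | cons w want' =>
      simp only [List.length_cons]
      rw [List.range_succ_eq_map]
      simp only [List.foldl_cons, List.foldl_map, List.getD_cons_zero, List.getD_cons_succ,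
        List.zip_cons_cons]
      exact ih want' _ (by simpa using h)

theorem build_dict_eq (want : List String) (number : List Int) (h : number.length ≤ want.length) :
    (PySem.List.pyRange 0 (number.length : Int)).foldl
      (fun d i => d.insert (PySem.List.pyGetD want i "") (PySem.List.pyGetD number i 0))
      PySem.Dict.empty
    = PySem.Dict.ofList (want.zip number) := by
  rw [PySem.List.pyRange_zero_nat, List.foldl_map]
  simp only [PySem.List.pyGetD_natCast]
  rw [foldl_insert_range_zip number want _ h]
  rfl

theorem map_range_getD_eq_window (l : List String) (a mm : Nat) (h : a + mm ≤ l.length) :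
    (List.range mm).map (fun k => l.getD (a + k) "") = pvW l mm a := by
  apply List.ext_getElem
  · simp [pvW]; omega
  · intro i h1 h2
    have hi : i < mm := by simpa using h1
    have hlen : a + i < l.length := by omega
    simp only [List.getElem_map, List.getElem_range, pvW, List.getElem_take, List.getElem_drop]
    rw [List.getD_eq_getElem l "" hlen]

theorem count_slide (l : List String) (mm t : Nat) (h : mm + t < l.length) (s : String) :
    (pvW l mm t).count s + (if s = l.getD (mm + t) "" then 1 else 0)
      = (if s = l.getD t "" then 1 else 0) + (pvW l mm (t + 1)).count s := by
  have h1 : pvW l mm t ++ [l.getD (mm + t) ""] = l.getD t "" :: pvW l mm (t + 1) := by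
    unfold pvW
    rw [show mm + t = t + mm from Nat.add_comm mm t]
    rw [List.getD_eq_getElem l "" (by omega), List.getD_eq_getElem l "" (by omega)]
    have hdrop : l.drop t = l[t] :: l.drop (t + 1) := List.drop_eq_getElem_cons (by omega)
    have h3 : (l.drop t).take (mm + 1)
        = (l.drop t).take mm ++ [(l.drop t)[mm]'(by rw [List.length_drop]; omega)] :=
      List.take_succ_eq_append_getElem (by rw [List.length_drop]; omega)
    rw [List.getElem_drop] at h3
    rw [← h3, hdrop, List.take_succ_cons]
  have h2 := congrArg (List.count s) h1
  simp only [List.count_append, List.count_cons, List.count_nil,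
    beq_iff_eq] at h2
  split_ifs at h2 ⊢ <;> first | omega | (exfalso; simp_all)

theorem pvPC_getD (n : Nat) : (pvPC n).getD 0 = (n : Int) := by
  unfold pvPC; split <;> simp_all

theorem step_get? (cnt : PySem.Dict String Int) (x left : String) (c c' : String → Nat)
    (hc : ∀ s, cnt.get? s = pvPC (c s))
    (hrel : ∀ s, c s + (if s = x then 1 else 0) = (if s = left then 1 else 0) + c' s) :
    ∀ s, ((if ((cnt.insert x (cnt.getD x 0 + 1)).getD left 0 - 1 == 0)
            then ((cnt.insert x (cnt.getD x 0 + 1)).insert left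
                    ((cnt.insert x (cnt.getD x 0 + 1)).getD left 0 - 1)).erase left
            else (cnt.insert x (cnt.getD x 0 + 1)).insert left
                  ((cnt.insert x (cnt.getD x 0 + 1)).getD left 0 - 1)).get? s) = pvPC (c' s) := by
  intro s
  have hgd : cnt.getD x 0 = (c x : Int) := by
    rw [PySem.Dict.getD_eq_get?_getD, hc, pvPC_getD]
  have hD : ∀ s, (cnt.insert x (cnt.getD x 0 + 1)).get? s
      = if s = x then some ((c x : Int) + 1) else pvPC (c s) := by
    intro s; rw [PySem.Dict.get?_insert]; split_ifs <;> simp [hgd, hc]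
  have hlx : c left + (if left = x then 1 else 0) = 1 + c' left := by
    have := hrel left; simpa using this
  have hg1 : (cnt.insert x (cnt.getD x 0 + 1)).getD left 0 = ((c' left : Int) + 1) := by
    rw [PySem.Dict.getD_eq_get?_getD, hD]
    split_ifs with he
    · subst he
      rw [if_pos rfl] at hlx
      simp only [Option.getD_some]
      omega
    · simp only [if_neg he] at hlx
      rw [pvPC_getD]
      omega
  have htail : ∀ s, s ≠ left → (cnt.insert x (cnt.getD x 0 + 1)).get? s = pvPC (c' s) := by
    intro s hs
    rw [hD]
    have hr := hrel s
    by_cases hx : s = x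
    · subst hx
      rw [if_pos rfl] at hr
      rw [if_neg hs] at hr
      rw [if_pos rfl]
      have hcc : c' s = c s + 1 := by omega
      rw [hcc]
      simp [pvPC]
    · rw [if_neg hx] at hr
      rw [if_neg hs] at hr
      rw [if_neg hx]
      have hcc : c' s = c s := by omega
      rw [hcc]
  rw [hg1]
  have hsimp : ((c' left : Int) + 1 - 1) = (c' left : Int) := by ring
  rw [hsimp]
  by_cases hz : c' left = 0
  · rw [if_pos (by simp [hz])]
    rw [get?_erase']
    split_ifs with hs
    · subst hs; simp [pvPC, hz]
    · rw [PySem.Dict.get?_insert, if_neg hs]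
      exact htail s hs
  · rw [if_neg (by simp [hz])]
    rw [PySem.Dict.get?_insert]
    split_ifs with hs
    · subst hs
      have : 0 < c' s := Nat.pos_of_ne_zero hz
      simp [pvPC, this]
    · exact htail s hs

-- invariant of B's fold: after t iterations the counter describes window (t-1)
-- and the accumulator counts the matching windows among the first t
theorem bfold_inv (discount : List String) (target : PySem.Dict String Int)
    (ht : target.keys.Nodup) (mm : Nat) (hmm : mm ≤ discount.length) :
    ∀ (t : Nat), t ≤ discount.length - mm + 1 →
    (∀ s, ((List.range t).foldl (pvBStep discount target mm)
        (PySem.Dict.counter (pvW discount mm 0), 0)).1.get? s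
      = pvPC ((pvW discount mm (t - 1)).count s))
    ∧ ((List.range t).foldl (pvBStep discount target mm)
        (PySem.Dict.counter (pvW discount mm 0), 0)).1.keys.Nodup
    ∧ ((List.range t).foldl (pvBStep discount target mm)
        (PySem.Dict.counter (pvW discount mm 0), 0)).2
      = (((List.range t).countP
          (fun a => pvDictEq (PySem.Dict.counter (pvW discount mm a)) target) : Nat) : Int) := by
  intro t
  induction t with
  | zero =>
    intro _
    exact ⟨fun s => counter_get?_eq _ s, PySem.Dict.nodup_keys_counter _, by simp⟩
  | succ t ih =>
    intro hle
    obtain ⟨ih1, ih2, ih3⟩ := ih (by omega)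
    rw [List.range_succ, List.foldl_append, List.foldl_cons, List.foldl_nil]
    set st := (List.range t).foldl (pvBStep discount target mm)
        (PySem.Dict.counter (pvW discount mm 0), 0) with hst
    by_cases ht0 : 0 < t
    · -- sliding step: window (t-1) → window t
      have hlen : mm + (t - 1) < discount.length := by omega
      have hget : ∀ s, (pvBStep discount target mm st t).1.get? s
          = pvPC ((pvW discount mm t).count s) := by
        simp only [pvBStep, if_pos ht0]
        have := step_get? st.1 (discount.getD (mm + (t - 1)) "") (discount.getD (t - 1) "")
          (fun s => (pvW discount mm (t - 1)).count s) (fun s => (pvW discount mm t).count s)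
          ih1 (fun s => by
            have := count_slide discount mm (t - 1) hlen s
            rwa [show t - 1 + 1 = t by omega] at this)
        exact this
      have hnd : (pvBStep discount target mm st t).1.keys.Nodup := by
        simp only [pvBStep, if_pos ht0]
        split_ifs
        · exact nodup_keys_erase _ _
            (PySem.Dict.nodup_keys_insert _ _ _ (PySem.Dict.nodup_keys_insert _ _ _ ih2))
        · exact PySem.Dict.nodup_keys_insert _ _ _ (PySem.Dict.nodup_keys_insert _ _ _ ih2)
      have heq : pvDictEq (pvBStep discount target mm st t).1 target
          = pvDictEq (PySem.Dict.counter (pvW discount mm t)) target := by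
        apply dictEq_congr _ _ _ hnd (PySem.Dict.nodup_keys_counter _) ht
        intro k
        rw [hget k, counter_get?_eq]
      have hsnd : (pvBStep discount target mm st t).2
          = st.2 + (if pvDictEq (pvBStep discount target mm st t).1 target then 1 else 0) := rfl
      refine ⟨by simpa [Nat.add_sub_cancel] using hget, hnd, ?_⟩
      rw [hsnd, heq, ih3, List.countP_append]
      simp only [List.countP_cons, List.countP_nil]
      split_ifs <;> simp
    · -- t = 0 : the initial window is compared, the counter is unchanged
      have ht0' : t = 0 := by omega
      subst ht0'
      have hfst : (pvBStep discount target mm st 0).1 = st.1 := by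
        simp [pvBStep]
      have hst0 : st.1 = PySem.Dict.counter (pvW discount mm 0) := by
        rw [hst]; rfl
      refine ⟨?_, ?_, ?_⟩
      · intro s
        rw [hfst, hst0, counter_get?_eq]
      · rw [hfst, hst0]; exact PySem.Dict.nodup_keys_counter _
      · have hsnd : (pvBStep discount target mm st 0).2
            = st.2 + (if pvDictEq (pvBStep discount target mm st 0).1 target then 1 else 0) := rfl
        rw [hsnd, hfst, hst0]
        have : st.2 = 0 := by rw [hst]; rfl
        rw [this]
        simp only [List.range_zero, List.countP_cons, List.countP_nil, List.nil_append]
        split_ifs <;> simp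

theorem main_eq (want : List String) (number : List Int) (discount : List String)
    (hpre : number.length ≤ want.length)
    (hnn : 0 ≤ number.foldl (fun s i => s + i) 0) :
    solution want number discount = solution_alt want number discount := by
  simp only [solution, solution_alt]
  rw [build_dict_eq want number hpre]
  set m : Int := number.foldl (fun s i => s + i) 0 with hm
  set target : PySem.Dict String Int := PySem.Dict.ofList (want.zip number) with htarget
  clear_value m target
  set n : Int := (discount.length : Int) with hn
  by_cases hbig : n - m + 1 ≤ 0
  · rw [PySem.List.pyRange_one_eq_nil (by omega : n - m + 1 ≤ 0)]
    rfl
  · obtain ⟨mm, hmm⟩ : ∃ mm : Nat, m = (mm : Int) := ⟨m.toNat, (Int.toNat_of_nonneg hnn).symm⟩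
    have hmle : mm ≤ discount.length := by omega
    set km := discount.length - mm with hkm
    have htnd : target.keys.Nodup := htarget ▸ PySem.Dict.nodup_keys_ofList _
    have htot : n - m + 1 = ((km + 1 : Nat) : Int) := by push_cast [hkm]; omega
    rw [htot, PySem.List.pyRange_zero_nat, List.foldl_map, List.foldl_map,
      PySem.List.foldl_count_if, zero_add]
    -- A's inner window build is the window list
    have hcong : (List.range (km + 1)).countP (fun (a : Nat) =>
          pvDictEq (PySem.Dict.counter
            ((PySem.List.pyRange (a : Int) (m + (a : Int))).foldl
              (fun l k => l ++ [PySem.List.pyGetD discount k ""]) [])) target)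
        = (List.range (km + 1)).countP
            (fun a => pvDictEq (PySem.Dict.counter (pvW discount mm a)) target) := by
      apply List.countP_congr
      intro a ha
      have halt : a ≤ km := by
        have := List.mem_range.mp ha
        omega
      have hwin : (PySem.List.pyRange (a : Int) (m + (a : Int))).foldl
          (fun l k => l ++ [PySem.List.pyGetD discount k ""]) []
          = pvW discount mm a := by
        rw [PySem.List.foldl_append_singleton_eq_map, List.nil_append, PySem.List.pyRange_one]
        rw [show ((m + (a : Int)) - (a : Int)).toNat = mm by omega]
        rw [List.map_map]
        have : ((fun k => PySem.List.pyGetD discount k "") ∘ fun k : Nat => (a : Int) + (k : Int))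
            = fun k : Nat => discount.getD (a + k) "" := by
          funext k
          simp only [Function.comp]
          rw [show (a : Int) + (k : Int) = ((a + k : Nat) : Int) by push_cast; ring,
            PySem.List.pyGetD_natCast]
        rw [this, map_range_getD_eq_window discount a mm (by omega)]
      simp only [hwin]
    rw [hcong]
    -- B's fold over Int indices is the Nat-indexed fold pvBStep
    have hsl : PySem.List.slice discount none (some m) = pvW discount mm 0 := by
      rw [hmm, PySem.List.slice_to_natCast]; simp [pvW]
    rw [hsl]
    have hb : (List.range (km + 1)).foldl
        (fun (st : PySem.Dict String Int × Int) (k : Nat) =>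
          let cnt :=
            if 0 < (k : Int) then
              let add := PySem.List.pyGetD discount ((k : Int) + m - 1) ""
              let cnt1 := st.1.insert add (st.1.getD add 0 + 1)
              let rem := PySem.List.pyGetD discount ((k : Int) - 1) ""
              let c := cnt1.getD rem 0 - 1
              let cnt2 := cnt1.insert rem c
              if c == 0 then cnt2.erase rem else cnt2
            else st.1
          (cnt, st.2 + (if pvDictEq cnt target then 1 else 0)))
        (PySem.Dict.counter (pvW discount mm 0), 0)
        = (List.range (km + 1)).foldl (pvBStep discount target mm)
        (PySem.Dict.counter (pvW discount mm 0), 0) := by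
      apply PySem.List.foldl_congr_mem
      intro acc k hk
      simp only [pvBStep]
      by_cases hk0 : 0 < k
      · rw [if_pos (by exact_mod_cast hk0), if_pos hk0]
        rw [show (k : Int) + m - 1 = ((mm + (k - 1) : Nat) : Int) by push_cast; omega,
          show (k : Int) - 1 = ((k - 1 : Nat) : Int) by omega]
        simp only [PySem.List.pyGetD_natCast]
      · rw [if_neg (by omega : ¬ (0:Int) < (k : Int)), if_neg hk0]
    rw [hb]
    obtain ⟨-, -, hB⟩ := bfold_inv discount target htnd mm hmle (km + 1) (by omega)
    exact hB.symm

-- ===== VERDICT (by name: the statement is the Claim_ definition above) =====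
theorem solution_spec : Claim_equal_solution := by
  intro want number discount _ hpre
  unfold Spec_solution
  exact main_eq want number discount hpre.1 hpre.2
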